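-- pv_equiv track=rewrite | github.com/SvenjaCSch/topic_segmentation_news | Tkinter.py | convert_new_data_to_integer
-- ===== SOURCE A (Python) =====
-- def convert_new_data_to_integer(new_text):
--     idx = 1
--     word2idx = {"<unk>":0}
--
--     for text in new_text:
--         tokens = text.split()
--         for token in tokens:
--             if token not in word2idx:
--                 word2idx[token] = idx
--                 idx += 1
--
--     train_text_int = []
--
--     for text in new_text:
--         tokens = text.split()
--         line_as_int = [word2idx[token] for token in tokens]
--         train_text_int.append(line_as_int)
--     return train_text_int
-- ===== SOURCE B (Python) =====
-- def convert_new_data_to_integer(new_text):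
--     word2idx = {"<unk>": 0}
--     train_text_int = []
--     for text in new_text:
--         line_as_int = []
--         for token in text.split():
--             line_as_int.append(word2idx.setdefault(token, len(word2idx)))
--         train_text_int.append(line_as_int)
--     return train_text_int
-- ===== Notes on version B (the rewrite author's own statement) =====
-- stated objective: idiomatic
-- what changed: Replaces A's two full passes over new_text (build the vocabulary, then re-split and map every line) with a single pass that assigns indices via word2idx.setdefault(token, len(word2idx)) while emitting each line's integers, dropping the explicit idx counter.
import Mathlib
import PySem

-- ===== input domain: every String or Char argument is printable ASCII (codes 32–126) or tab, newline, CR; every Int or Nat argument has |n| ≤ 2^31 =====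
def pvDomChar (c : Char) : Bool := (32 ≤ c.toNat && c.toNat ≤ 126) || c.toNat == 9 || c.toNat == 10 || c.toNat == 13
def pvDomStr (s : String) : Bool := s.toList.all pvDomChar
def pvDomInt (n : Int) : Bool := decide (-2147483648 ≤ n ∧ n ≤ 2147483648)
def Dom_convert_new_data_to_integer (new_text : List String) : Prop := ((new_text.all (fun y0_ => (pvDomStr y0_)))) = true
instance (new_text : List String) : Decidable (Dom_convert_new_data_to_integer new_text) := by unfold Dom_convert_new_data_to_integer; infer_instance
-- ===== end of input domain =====

-- B replaces A's two passes (build vocab, then re-split and map every line) by a single setdefault pass that assigns indices and emits each line in one go.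

-- ===== PORT A =====
-- first loop's state: (idx, word2idx)
def convAStep (s : Int × PySem.Dict String Int) (token : String) : Int × PySem.Dict String Int :=
  if s.2.contains token then s else (s.1 + 1, s.2.insert token s.1)

-- word2idx[token]: the key is always present here (inserted by the first loop), so
-- (get? ...).getD 0 is exact — the default branch is unreachable.
def convert_new_data_to_integer (new_text : List String) : List (List Int) :=
  let s := new_text.foldl (fun s text => (PySem.Str.split₀ text).foldl convAStep s)
    (1, PySem.Dict.ofList [("<unk>", (0 : Int))])
  new_text.foldl (fun acc text =>
    acc ++ [(PySem.Str.split₀ text).map (fun token => ((s.2.get? token).getD 0))]) []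

-- ===== PORT B =====
-- inner loop's state: (word2idx, line_as_int); setdefault returns the stored value,
-- i.e. the value of `token` in the updated dict.
def convBStep (s : PySem.Dict String Int × List Int) (token : String) :
    PySem.Dict String Int × List Int :=
  let d := s.1.setdefault token (s.1.size : Int)
  (d, s.2 ++ [d.getD token 0])

def convert_new_data_to_integer_alt (new_text : List String) : List (List Int) :=
  (new_text.foldl (fun s text =>
      let r := (PySem.Str.split₀ text).foldl convBStep (s.1, [])
      (r.1, s.2 ++ [r.2]))
    (PySem.Dict.ofList [("<unk>", (0 : Int))], [])).2

-- ===== PRECONDITION & SPEC =====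
def Spec_convert_new_data_to_integer (new_text : List String) (out : List (List Int)) : Prop := out = convert_new_data_to_integer_alt new_text
instance (new_text : List String) (out : List (List Int)) : Decidable (Spec_convert_new_data_to_integer new_text out) := by unfold Spec_convert_new_data_to_integer; infer_instance

-- ===== CLAIM (what is proved, stated in full; the proofs are below) =====
def Claim_equal_convert_new_data_to_integer : Prop := ∀ (new_text : List String), Dom_convert_new_data_to_integer new_text → Spec_convert_new_data_to_integer new_text (convert_new_data_to_integer new_text)

-- ===== LEMMAS AND PROOFS =====

-- the common vocabulary-building step, without idx counter / line output
def buildStep (d : PySem.Dict String Int) (t : String) : PySem.Dict String Int :=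
  if d.contains t then d else d.insert t (d.size : Int)

def buildLines (d : PySem.Dict String Int) (lines : List String) : PySem.Dict String Int :=
  lines.foldl (fun d text => (PySem.Str.split₀ text).foldl buildStep d) d

-- values emitted by B's inner loop starting from dict d
def valsB (d : PySem.Dict String Int) : List String → List Int
  | [] => []
  | t :: ts => ((buildStep d t).get? t).getD 0 :: valsB (buildStep d t) ts

theorem convAStep_eq (d : PySem.Dict String Int) (t : String) :
    convAStep ((d.size : Int), d) t = (((buildStep d t).size : Int), buildStep d t) := by
  unfold convAStep buildStep
  by_cases h : d.contains t
  · simp [h]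
  · simp [h, PySem.Dict.size_insert]

theorem foldlA_eq (ts : List String) (d : PySem.Dict String Int) :
    ts.foldl convAStep ((d.size : Int), d) = (((ts.foldl buildStep d).size : Int), ts.foldl buildStep d) := by
  induction ts generalizing d with
  | nil => rfl
  | cons t ts ih => simp only [List.foldl_cons, convAStep_eq]; exact ih _

theorem foldlA_lines_eq (lines : List String) (d : PySem.Dict String Int) :
    lines.foldl (fun s text => (PySem.Str.split₀ text).foldl convAStep s) ((d.size : Int), d)
      = (((buildLines d lines).size : Int), buildLines d lines) := by
  induction lines generalizing d with
  | nil => rfl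
  | cons l ls ih =>
      simp only [List.foldl_cons, foldlA_eq]
      exact ih _

theorem get?_buildStep_mono {d : PySem.Dict String Int} {k : String} {v : Int}
    (h : d.get? k = some v) (t : String) : (buildStep d t).get? k = some v := by
  unfold buildStep
  split
  · exact h
  · rcases eq_or_ne k t with rfl | hne
    · exfalso
      rename_i hc
      have := PySem.Dict.contains_eq_isSome_get? (d := d) (k := k)
      rw [h] at this
      simp at this
      exact hc this
    · rw [PySem.Dict.get?_insert_of_ne _ _ hne, h]

theorem get?_foldl_build_mono {d : PySem.Dict String Int} {k : String} {v : Int}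
    (h : d.get? k = some v) (ts : List String) : (ts.foldl buildStep d).get? k = some v := by
  induction ts generalizing d with
  | nil => exact h
  | cons t ts ih => exact ih (get?_buildStep_mono h t)

theorem get?_buildLines_mono {d : PySem.Dict String Int} {k : String} {v : Int}
    (h : d.get? k = some v) (lines : List String) : (buildLines d lines).get? k = some v := by
  induction lines generalizing d with
  | nil => exact h
  | cons l ls ih => exact ih (get?_foldl_build_mono h _)

theorem get?_buildStep_self (d : PySem.Dict String Int) (t : String) :
    ∃ v, (buildStep d t).get? t = some v := by
  unfold buildStep
  by_cases h : d.contains t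
  · rw [if_pos h]
    have := PySem.Dict.contains_eq_isSome_get? (d := d) (k := t)
    rw [h] at this
    rcases Option.isSome_iff_exists.mp this.symm with ⟨v, hv⟩
    exact ⟨v, hv⟩
  · rw [if_neg h]
    exact ⟨_, PySem.Dict.get?_insert_self _ _ _⟩

theorem convBStep_eq (d : PySem.Dict String Int) (acc : List Int) (t : String) :
    convBStep (d, acc) t = (buildStep d t, acc ++ [((buildStep d t).get? t).getD 0]) := by
  unfold convBStep buildStep
  by_cases h : d.contains t
  · simp [PySem.Dict.setdefault_of_contains _ _ h, h, PySem.Dict.getD_eq_get?_getD]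
  · simp [PySem.Dict.setdefault_of_not_contains _ _ (by simpa using h), h,
      PySem.Dict.getD_eq_get?_getD]

theorem foldlB_eq (ts : List String) (d : PySem.Dict String Int) (acc : List Int) :
    ts.foldl convBStep (d, acc) = (ts.foldl buildStep d, acc ++ valsB d ts) := by
  induction ts generalizing d acc with
  | nil => simp [valsB]
  | cons t ts ih =>
      simp only [List.foldl_cons, convBStep_eq, ih, valsB, List.append_assoc,
        List.singleton_append]

theorem valsB_eq_map (ts : List String) (d F : PySem.Dict String Int)
    (hF : ∀ k v, (ts.foldl buildStep d).get? k = some v → F.get? k = some v) :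
    valsB d ts = ts.map (fun t => (F.get? t).getD 0) := by
  induction ts generalizing d with
  | nil => rfl
  | cons t ts ih =>
      rcases get?_buildStep_self d t with ⟨v, hv⟩
      have hv' : F.get? t = some v := hF t v (get?_foldl_build_mono hv ts)
      simp only [valsB, List.map_cons, hv, hv']
      exact congrArg _ (ih (buildStep d t) (fun k v h => hF k v h))

theorem foldlB_lines_eq (lines : List String) (d : PySem.Dict String Int)
    (acc : List (List Int)) (F : PySem.Dict String Int)
    (hF : ∀ k v, (buildLines d lines).get? k = some v → F.get? k = some v) :
    lines.foldl (fun s text =>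
        let r := (PySem.Str.split₀ text).foldl convBStep (s.1, [])
        (r.1, s.2 ++ [r.2])) (d, acc)
      = (buildLines d lines,
         acc ++ lines.map (fun text =>
           (PySem.Str.split₀ text).map (fun t => (F.get? t).getD 0))) := by
  induction lines generalizing d acc with
  | nil => simp [buildLines]
  | cons l ls ih =>
      have hstep : buildLines d (l :: ls) = buildLines ((PySem.Str.split₀ l).foldl buildStep d) ls := rfl
      rw [List.foldl_cons]
      have h1 : (let r := List.foldl convBStep (((d, acc) : PySem.Dict String Int × List (List Int)).1, []) (PySem.Str.split₀ l)
          ((r.1, (d, acc).2 ++ [r.2]) : PySem.Dict String Int × List (List Int)))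
          = ((PySem.Str.split₀ l).foldl buildStep d,
             acc ++ [(PySem.Str.split₀ l).map (fun t => (F.get? t).getD 0)]) := by
        show ((((PySem.Str.split₀ l).foldl convBStep (d, [])).1,
               acc ++ [((PySem.Str.split₀ l).foldl convBStep (d, [])).2]) :
               PySem.Dict String Int × List (List Int)) = _
        rw [foldlB_eq, valsB_eq_map (PySem.Str.split₀ l) d F
          (fun k v h => hF k v (by rw [hstep]; exact get?_buildLines_mono h ls))]
        simp
      rw [h1, ih ((PySem.Str.split₀ l).foldl buildStep d) _
        (fun k v h => hF k v (by rw [hstep]; exact h))]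
      simp [hstep]

theorem foldl_append_map (lines : List String) (g : String → List Int) (acc : List (List Int)) :
    lines.foldl (fun acc text => acc ++ [g text]) acc = acc ++ lines.map g := by
  induction lines generalizing acc with
  | nil => simp
  | cons l ls ih => simp [ih, List.append_assoc]

-- ===== VERDICT (by name: the statement is the Claim_ definition above) =====
theorem convert_new_data_to_integer_spec : Claim_equal_convert_new_data_to_integer := by
  intro new_text _
  unfold Spec_convert_new_data_to_integer convert_new_data_to_integer convert_new_data_to_integer_alt
  have h0 : (1 : Int) = ((PySem.Dict.ofList [("<unk>", (0 : Int))]).size : Int) := by decide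
  rw [h0, foldlA_lines_eq]
  rw [foldlB_lines_eq new_text _ [] (buildLines (PySem.Dict.ofList [("<unk>", (0 : Int))]) new_text)
    (fun _ _ h => h)]
  rw [foldl_append_map new_text (fun text => (PySem.Str.split₀ text).map
    (fun token => (((buildLines (PySem.Dict.ofList [("<unk>", (0 : Int))]) new_text).get? token).getD 0))) []]
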